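-- pv_equiv track=rewrite | github.com/leafvmaple/pycppfilt | cppfilt/__init__.py | demangle_msvc
-- ===== SOURCE A (Python) =====
-- def demangle_msvc(src):
--     namespace = []
--     params    = []
--     namestr = ''
--     paramflag = False
--
--     for c in src:
--         if not paramflag:
--             if len(namestr) > 0 and c == '@':
--                 namespace.append(namestr)
--                 namestr = ''
--                 continue
--             if c == '@':
--                 paramflag = True
--                 continue
--             namestr += c
--         else:
--             if c == '@':
--                 break
--             # params.append(MSVC_PARAMS[c])
--
--     namespace.reverse()
--     return '::'.join(namespace) + '()'
-- ===== SOURCE B (Python) =====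
-- def demangle_msvc(src):
--     parts = src.split('@')
--     segs = []
--     for tok in parts[:-1]:
--         if not tok:
--             break
--         segs.append(tok)
--     return '::'.join(reversed(segs)) + '()'
-- ===== Notes on version B (the rewrite author's own statement) =====
-- stated objective: simpler
-- what changed: Replaces the character-level state machine (namestr accumulator + paramflag) with a split('@')-then-take-tokens decomposition: collect tokens of parts[:-1] up to the first empty token, reverse, join.
import Mathlib
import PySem

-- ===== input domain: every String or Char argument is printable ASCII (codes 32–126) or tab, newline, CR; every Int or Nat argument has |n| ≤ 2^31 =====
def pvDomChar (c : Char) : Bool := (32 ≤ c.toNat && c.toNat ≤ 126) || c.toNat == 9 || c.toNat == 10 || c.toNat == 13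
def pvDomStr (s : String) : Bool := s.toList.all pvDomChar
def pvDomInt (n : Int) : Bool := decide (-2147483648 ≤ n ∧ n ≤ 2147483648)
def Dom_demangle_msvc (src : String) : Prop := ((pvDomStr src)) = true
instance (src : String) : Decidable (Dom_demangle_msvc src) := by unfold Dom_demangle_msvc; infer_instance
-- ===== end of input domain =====

-- B replaces A's character-level state machine with split('@') followed by taking tokens
-- up to the first empty one (objective: simpler).

-- ===== PORT A =====
-- A's for-loop over characters; state = (namespace, namestr, paramflag).
-- (The unused `params` list of A is dead code and carries no state.)
def demangleA_go : List Char → List (List Char) → List Char → Bool → List (List Char)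
  | [], ns, _, _ => ns
  | c :: rest, ns, namestr, false =>
      if 0 < namestr.length ∧ c = '@' then demangleA_go rest (ns ++ [namestr]) [] false
      else if c = '@' then demangleA_go rest ns namestr true
      else demangleA_go rest ns (namestr ++ [c]) false
  | c :: rest, ns, namestr, true =>
      -- paramflag branch: break on '@' (ends the loop), otherwise does nothing
      if c = '@' then ns else demangleA_go rest ns namestr true

def demangle_msvc (src : String) : String :=
  let ns := demangleA_go src.toList [] [] false
  String.ofList (PySem.Chars.join "::".toList ns.reverse ++ "()".toList)

-- ===== PORT B =====
-- Source B: parts = src.split('@'); collect tokens of parts[:-1] until the first empty one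
-- (the for/break loop is exactly takeWhile); reverse; '::'.join(...) + '()'.
def demangle_msvc_alt (src : String) : String :=
  let parts := src.toList.splitOn '@'
  let segs := parts.dropLast.takeWhile (· ≠ [])
  String.ofList (PySem.Chars.join "::".toList segs.reverse ++ "()".toList)

-- ===== PRECONDITION & SPEC =====
def Spec_demangle_msvc (src : String) (out : String) : Prop := out = demangle_msvc_alt src
instance (src : String) (out : String) : Decidable (Spec_demangle_msvc src out) := by unfold Spec_demangle_msvc; infer_instance

-- ===== CLAIM (what is proved, stated in full; the proofs are below) =====
def Claim_equal_demangle_msvc : Prop := ∀ (src : String), Dom_demangle_msvc src → Spec_demangle_msvc src (demangle_msvc src)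

-- ===== LEMMAS AND PROOFS =====

-- Once paramflag is set, A's loop never changes the namespace list.
theorem demangleA_go_true (cs : List Char) (ns : List (List Char)) (acc : List Char) :
    demangleA_go cs ns acc true = ns := by
  induction cs generalizing acc with
  | nil => rfl
  | cons c rest ih =>
      simp only [demangleA_go]
      split_ifs <;> simp_all

-- The state-machine invariant: with no '@' in the accumulator, A's loop computes
-- exactly B's take-until-empty over the split of (acc ++ cs), appended to ns.
theorem demangleA_go_split (cs : List Char) (ns : List (List Char)) (acc : List Char)
    (h : '@' ∉ acc) :
    demangleA_go cs ns acc false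
      = ns ++ ((acc ++ cs).splitOn '@').dropLast.takeWhile (· ≠ []) := by
  induction cs generalizing ns acc with
  | nil =>
      have hsingle : (acc.splitOn '@') = [acc] := by
        simp only [List.splitOn]
        exact List.splitOnP_eq_single _ _ (by intro x hx; simp only [beq_iff_eq]; rintro rfl; exact h hx)
      simp [demangleA_go, hsingle]
  | cons c rest ih =>
      by_cases hc : c = '@'
      · subst hc
        by_cases hacc : acc = []
        · subst hacc
          have hsplit : (([] : List Char) ++ '@' :: rest).splitOn '@'
              = [] :: rest.splitOn '@' := by
            simp [List.splitOn]
          have step : demangleA_go ('@' :: rest) ns [] false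
              = demangleA_go rest ns [] true := by
            simp [demangleA_go]
          rw [step, demangleA_go_true, hsplit]
          rcases hdl : (([] : List Char) :: rest.splitOn '@').dropLast with - | ⟨x, l⟩
          · simp
          · have hx : x = [] := by
              have hpre := List.dropLast_prefix (([] : List Char) :: rest.splitOn '@')
              rw [hdl] at hpre
              rcases hpre with ⟨t, ht⟩
              simpa using congrArg (fun l => l.head?) ht.symm
            subst hx
            simp
        · have hlen : 0 < acc.length := List.length_pos_of_ne_nil hacc
          have hsplit : (acc ++ '@' :: rest).splitOn '@' = acc :: rest.splitOn '@' := by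
            simp only [List.splitOn]
            exact List.splitOnP_first _ _
              (by intro x hx; simp only [beq_iff_eq]; rintro rfl; exact h hx) '@' (by simp) rest
          have hne : rest.splitOn '@' ≠ [] := by
            simp only [List.splitOn]; exact List.splitOnP_ne_nil _ rest
          have step : demangleA_go ('@' :: rest) ns acc false
              = demangleA_go rest (ns ++ [acc]) [] false := by
            simp [demangleA_go, hlen]
          rw [step, ih (ns ++ [acc]) [] (by simp), hsplit,
            List.dropLast_cons_of_ne_nil hne, List.takeWhile_cons_of_pos (by simpa using hacc)]
          simp
      · have step : demangleA_go (c :: rest) ns acc false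
            = demangleA_go rest ns (acc ++ [c]) false := by
          simp [demangleA_go, hc]
        have hsplit : acc ++ c :: rest = (acc ++ [c]) ++ rest := by simp
        rw [step, ih ns (acc ++ [c]) (by simp [h, Ne.symm hc]), hsplit]

-- ===== VERDICT (by name: the statement is the Claim_ definition above) =====
theorem demangle_msvc_spec : Claim_equal_demangle_msvc := by
  intro src _
  show demangle_msvc src = demangle_msvc_alt src
  simp only [demangle_msvc, demangle_msvc_alt]
  rw [demangleA_go_split src.toList [] [] (by simp)]
  simp
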